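-- pv_equiv track=rewrite | github.com/DimitriMedNov/Python-Exercises | Valida el rfc/Valida el rfc/Valida_el_rfc.py | esRFC
-- ===== SOURCE A (Python) =====
-- def esRFC(pRFC):
--     valido = True
--     for i in  range(0, len(pRFC), 1):
--         if i <= 3:
--             if not str(pRFC[i]).isalpha():
--                 valido = False
--                 break
--         elif i <= 9:
--             if not str(pRFC[i]).isdigit():
--                 valido = False
--                 break
--         else:
--             if not str(pRFC[i]).isalnum():
--                 valido = False
--                 break
--     return valido
-- ===== SOURCE B (Python) =====
-- def esRFC(pRFC):
--     s1, s2, s3 = pRFC[0:4], pRFC[4:10], pRFC[10:]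
--     return ((s1 == "" or s1.isalpha())
--             and (s2 == "" or s2.isdigit())
--             and (s3 == "" or s3.isalnum()))
-- ===== Notes on version B (the rewrite author's own statement) =====
-- stated objective: simpler
-- what changed: Replaces the char-by-char index loop with an index branch and early break by validating the three positional fields as whole slices via str.isalpha/isdigit/isalnum (with empty-slice guards so shorter strings are accepted exactly as A accepts them).
import Mathlib
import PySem

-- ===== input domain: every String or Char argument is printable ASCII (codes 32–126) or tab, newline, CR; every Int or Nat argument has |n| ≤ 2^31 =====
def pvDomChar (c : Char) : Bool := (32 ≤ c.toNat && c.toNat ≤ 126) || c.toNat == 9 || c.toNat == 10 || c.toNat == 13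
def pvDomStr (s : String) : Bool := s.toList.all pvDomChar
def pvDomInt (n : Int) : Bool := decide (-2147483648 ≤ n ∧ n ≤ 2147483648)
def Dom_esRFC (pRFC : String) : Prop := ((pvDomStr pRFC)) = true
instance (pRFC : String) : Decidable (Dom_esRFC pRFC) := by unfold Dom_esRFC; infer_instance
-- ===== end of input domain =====

-- B validates the three positional fields as whole slices (with empty-slice guards)
-- instead of A's char-by-char index loop with early break; objective: simpler.


-- ===== PORT A =====
-- the 'for i in range(0, len(pRFC), 1)' loop with its early 'break': recursion over
-- the remaining characters carrying the index i; returning false is the break.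
def esRFCLoop : Nat → List Char → Bool
  | _, [] => true
  | i, c :: rest =>
    if i ≤ 3 then
      if !PySem.Chars.strIsalpha [c] then false else esRFCLoop (i + 1) rest
    else if i ≤ 9 then
      if !PySem.Chars.strIsdigit [c] then false else esRFCLoop (i + 1) rest
    else
      if !PySem.Chars.strIsalnum [c] then false else esRFCLoop (i + 1) rest

def esRFC (pRFC : String) : Bool := esRFCLoop 0 pRFC.toList

-- ===== PORT B =====
def esRFC_alt (pRFC : String) : Bool :=
  let s1 := PySem.Str.slice pRFC (some 0) (some 4)
  let s2 := PySem.Str.slice pRFC (some 4) (some 10)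
  let s3 := PySem.Str.slice pRFC (some 10) none
  ((s1 == "") || PySem.Str.strIsalpha s1) &&
  ((s2 == "") || PySem.Str.strIsdigit s2) &&
  ((s3 == "") || PySem.Str.strIsalnum s3)

-- ===== PRECONDITION & SPEC =====
def Spec_esRFC (pRFC : String) (out : Bool) : Prop := out = esRFC_alt pRFC
instance (pRFC : String) (out : Bool) : Decidable (Spec_esRFC pRFC out) := by unfold Spec_esRFC; infer_instance

-- ===== CLAIM (what is proved, stated in full; the proofs are below) =====
def Claim_equal_esRFC : Prop := ∀ (pRFC : String), Dom_esRFC pRFC → Spec_esRFC pRFC (esRFC pRFC)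

-- ===== LEMMAS AND PROOFS =====

-- an "empty or isX" guard on a string is just List.all of the char predicate
theorem guard_eq_all (s : String) (p : Char → Bool) :
    ((s == "") || (!s.toList.isEmpty && s.toList.all p)) = s.toList.all p := by
  cases h : s.toList with
  | nil =>
    have : s = "" := String.toList_eq_nil_iff.mp h
    simp [this]
  | cons c cs =>
    have : (s == "") = false := by
      rw [beq_eq_false_iff_ne]
      intro he
      rw [he] at h
      simp at h
    simp [this]

-- the loop in the third field checks isalnum on every remaining char
theorem loop_alnum (cs : List Char) (i : Nat) (hi : 10 ≤ i) :
    esRFCLoop i cs = cs.all PySem.Chars.isalnum := by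
  induction cs generalizing i with
  | nil => simp [esRFCLoop]
  | cons c rest ih =>
    have h3 : ¬ i ≤ 3 := by omega
    have h9 : ¬ i ≤ 9 := by omega
    simp only [esRFCLoop, if_neg h3, if_neg h9, PySem.Chars.strIsalnum]
    by_cases hc : PySem.Chars.isalnum c = true
    · simp [hc, ih (i + 1) (by omega)]
    · simp [Bool.not_eq_true] at hc; simp [hc]

-- the loop in the second field checks isdigit up to index 9, then alnum
theorem loop_digit (cs : List Char) (i : Nat) (hlo : 4 ≤ i) (hhi : i ≤ 9) :
    esRFCLoop i cs = ((cs.take (10 - i)).all PySem.Chars.isdigit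
                      && (cs.drop (10 - i)).all PySem.Chars.isalnum) := by
  induction cs generalizing i with
  | nil => simp [esRFCLoop]
  | cons c rest ih =>
    have h3 : ¬ i ≤ 3 := by omega
    simp only [esRFCLoop, if_neg h3, if_pos hhi, PySem.Chars.strIsdigit]
    have htake : (10 - i) = (10 - (i+1)) + 1 := by omega
    by_cases hc : PySem.Chars.isdigit c = true
    · by_cases h9 : i + 1 ≤ 9
      · rw [htake]
        simp [hc, ih (i + 1) (by omega) h9]
      · have hi : i = 9 := by omega
        subst hi
        simp [hc, loop_alnum rest 10 (by omega)]
    · simp [Bool.not_eq_true] at hc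
      rw [htake]
      simp [hc]

-- the loop in the first field checks isalpha up to index 3, then digit, then alnum
theorem loop_alpha (cs : List Char) (i : Nat) (hhi : i ≤ 3) :
    esRFCLoop i cs = ((cs.take (4 - i)).all PySem.Chars.isalpha
                      && ((cs.drop (4 - i)).take 6).all PySem.Chars.isdigit
                      && ((cs.drop (4 - i)).drop 6).all PySem.Chars.isalnum) := by
  induction cs generalizing i with
  | nil => simp [esRFCLoop]
  | cons c rest ih =>
    simp only [esRFCLoop, if_pos hhi, PySem.Chars.strIsalpha]
    have htake : (4 - i) = (4 - (i+1)) + 1 := by omega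
    by_cases hc : PySem.Chars.isalpha c = true
    · by_cases h3 : i + 1 ≤ 3
      · rw [htake]
        simp [hc, ih (i + 1) h3]
      · have hi : i = 3 := by omega
        subst hi
        have := loop_digit rest 4 (by omega) (by omega)
        simp [hc, this]
    · simp [Bool.not_eq_true] at hc
      rw [htake]
      simp [hc]

theorem esRFC_spec : Claim_equal_esRFC := by
  intro s _
  unfold Spec_esRFC esRFC esRFC_alt
  have h1 := guard_eq_all (PySem.Str.slice s (some 0) (some 4)) PySem.Chars.isalpha
  have h2 := guard_eq_all (PySem.Str.slice s (some 4) (some 10)) PySem.Chars.isdigit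
  have h3 := guard_eq_all (PySem.Str.slice s (some 10) none) PySem.Chars.isalnum
  simp only [PySem.Str.strIsalpha_eq, PySem.Str.strIsdigit_eq, PySem.Str.strIsalnum_eq,
    PySem.Chars.strIsalpha, PySem.Chars.strIsdigit, PySem.Chars.strIsalnum,
    PySem.Str.toList_slice, PySem.Chars.slice_eq_listSlice] at h1 h2 h3 ⊢
  rw [h1, h2, h3]
  rw [loop_alpha s.toList 0 (by omega)]
  have e1 : PySem.List.slice s.toList (some (0:Int)) (some (4:Int)) = (s.toList.drop 0).take 4 := by
    exact_mod_cast PySem.List.slice_natCast s.toList 0 4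
  have e2 : PySem.List.slice s.toList (some (4:Int)) (some (10:Int)) = (s.toList.drop 4).take 6 := by
    exact_mod_cast PySem.List.slice_natCast s.toList 4 10
  have e3 : PySem.List.slice s.toList (some (10:Int)) none = s.toList.drop 10 := by
    exact_mod_cast PySem.List.slice_from_natCast s.toList 10
  rw [e1, e2, e3]
  simp [List.drop_drop]
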